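-- pv_equiv track=rewrite | github.com/hozzang-98/Study | 프로그래머스/2/388352. 비밀 코드 해독/비밀 코드 해독.py | solution
-- ===== SOURCE A (Python) =====
-- from itertools import combinations
--
-- def solution(n, q, ans):
--
--     count = 0
--     for candidate in combinations(range(1, n+1), 5):
--
--         valid = True
--
--         for trial, answer in zip(q, ans):
--
--             if len(set(candidate) & set(trial)) != answer:
--                 valid = False
--                 break
--
--         if valid: count += 1
--
--     return count
-- ===== SOURCE B (Python) =====
-- def solution(n, q, ans):
--     qa = [(set(t), a) for t, a in zip(q, ans)]
--
--     # DFS over values 1..n with take-or-skip recursion, carrying per-query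
--     # incremental match counters and pruning a branch as soon as some
--     # counter already exceeds its required answer.
--     def rec(vals, k, counts):
--         if k == 0:
--             return 1 if all(c == a for c, (_, a) in zip(counts, qa)) else 0
--         if not vals:
--             return 0
--         v, rest = vals[0], vals[1:]
--         newcounts = [c + (v in s) for c, (s, _) in zip(counts, qa)]
--         take = 0 if any(c > a for c, (_, a) in zip(newcounts, qa)) \
--             else rec(rest, k - 1, newcounts)
--         return take + rec(rest, k, counts)
--
--     return rec(list(range(1, n + 1)), 5, [0] * len(qa))
-- ===== Notes on version B (the rewrite author's own statement) =====
-- stated objective: faster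
-- what changed: B replaces A's enumerate-then-test over materialized 5-combinations (set intersection per query) by a take-or-skip DFS over the values 1..n carrying per-query incremental match counters, pruning a branch as soon as some counter exceeds its required answer; intended as faster, measured 150-370x at the larger timing sizes.
import Mathlib
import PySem

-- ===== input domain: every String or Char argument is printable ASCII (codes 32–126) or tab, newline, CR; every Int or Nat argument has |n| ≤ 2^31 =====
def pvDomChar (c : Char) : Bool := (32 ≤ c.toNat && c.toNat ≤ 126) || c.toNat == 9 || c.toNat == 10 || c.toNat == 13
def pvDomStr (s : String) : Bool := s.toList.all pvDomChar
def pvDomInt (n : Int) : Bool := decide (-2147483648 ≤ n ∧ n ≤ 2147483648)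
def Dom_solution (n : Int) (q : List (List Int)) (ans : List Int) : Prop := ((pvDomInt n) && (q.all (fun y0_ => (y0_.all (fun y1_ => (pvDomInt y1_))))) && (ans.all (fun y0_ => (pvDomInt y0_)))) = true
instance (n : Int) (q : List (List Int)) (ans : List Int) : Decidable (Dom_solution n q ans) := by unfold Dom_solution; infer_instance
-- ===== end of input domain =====

-- B replaces A's "enumerate every combination, then test it against all queries with
-- set intersections" by a take-or-skip DFS over the values 1..n that carries per-query
-- incremental match counters and prunes a branch once a counter exceeds its answer.

-- ===== PORT A =====
-- inner 'for trial, answer in zip(q, ans)' loop with the valid flag and break: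
-- returns false as soon as len(set(candidate) & set(trial)) != answer
def chkA (c : List Int) (pairs : List (List Int × Int)) : Bool :=
  match pairs with
  | [] => true
  | (trial, answer) :: rest =>
      if ((PySem.Set.len (PySem.Set.inter (PySem.Set.ofList c) (PySem.Set.ofList trial)) : Int) ≠ answer) then false
      else chkA c rest

def solution (n : Int) (q : List (List Int)) (ans : List Int) : Int :=
  (PySem.List.combinations (PySem.List.pyRange 1 (n + 1) 1) 5).foldl
    (fun count candidate => if chkA candidate (q.zip ans) then count + 1 else count) 0

-- ===== PORT B =====
-- 'rec(vals, k, counts)': take-or-skip recursion over the remaining values,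
-- with the per-query counters and the exceed-prune, exactly as in Source B
def recB (qa : List (PySem.Set Int × Int)) : List Int → Nat → List Int → Int
  | _, 0, counts => if (counts.zip qa).all (fun p => p.1 == p.2.2) then 1 else 0
  | [], _ + 1, _ => 0
  | v :: rest, k + 1, counts =>
      let newcounts := (counts.zip qa).map (fun p => p.1 + (if PySem.Set.contains p.2.1 v then (1 : Int) else 0))
      let take := if (newcounts.zip qa).any (fun p => p.2.2 < p.1) then (0 : Int)
                  else recB qa rest k newcounts
      take + recB qa rest (k + 1) counts

def solution_alt (n : Int) (q : List (List Int)) (ans : List Int) : Int :=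
  let qa := (q.zip ans).map (fun p => (PySem.Set.ofList p.1, p.2))
  recB qa (PySem.List.pyRange 1 (n + 1) 1) 5 (List.replicate qa.length (0 : Int))

-- ===== PRECONDITION & SPEC =====
def Spec_solution (n : Int) (q : List (List Int)) (ans : List Int) (out : Int) : Prop := out = solution_alt n q ans
instance (n : Int) (q : List (List Int)) (ans : List Int) (out : Int) : Decidable (Spec_solution n q ans out) := by unfold Spec_solution; infer_instance

-- ===== CLAIM =====
def Claim_equal_solution : Prop := ∀ (n : Int) (q : List (List Int)) (ans : List Int), Dom_solution n q ans → Spec_solution n q ans (solution n q ans)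

-- ===== LEMMAS AND PROOFS =====

-- abstract views of B's loop body, used only by the proofs
def stepC (qa : List (PySem.Set Int × Int)) (counts : List Int) (v : Int) : List Int :=
  (counts.zip qa).map (fun p => p.1 + (if PySem.Set.contains p.2.1 v then (1 : Int) else 0))

def addC (qa : List (PySem.Set Int × Int)) (counts : List Int) (c : List Int) : List Int :=
  c.foldl (stepC qa) counts

def goodC (qa : List (PySem.Set Int × Int)) (counts : List Int) : Bool :=
  (counts.zip qa).all (fun p => p.1 == p.2.2)

lemma length_stepC (qa : List (PySem.Set Int × Int)) (counts : List Int) (v : Int)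
    (h : counts.length = qa.length) : (stepC qa counts v).length = qa.length := by
  simp only [stepC, List.length_map, List.length_zip]
  omega

lemma length_addC (qa : List (PySem.Set Int × Int)) (counts c : List Int)
    (h : counts.length = qa.length) : (addC qa counts c).length = qa.length := by
  induction c generalizing counts with
  | nil => exact h
  | cons v c ih => exact ih _ (length_stepC qa counts v h)

lemma le_addC (qa : List (PySem.Set Int × Int)) (counts c : List Int)
    (h : counts.length = qa.length) (i : Nat) (hi : i < qa.length) :
    counts[i]'(by omega) ≤ (addC qa counts c)[i]'(by rw [length_addC qa counts c h]; exact hi) := by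
  induction c generalizing counts with
  | nil => exact le_refl _
  | cons v c ih =>
    have hs := length_stepC qa counts v h
    refine le_trans ?_ (ih (stepC qa counts v) hs)
    have : (stepC qa counts v)[i]'(by omega) = counts[i]'(by omega) + (if PySem.Set.contains (qa[i]'hi).1 v then (1 : Int) else 0) := by
      simp [stepC]
    rw [this]
    split <;> omega

-- pruning is sound: once some counter exceeds its answer, no extension is good
lemma goodC_false_of_bad (qa : List (PySem.Set Int × Int)) (counts c : List Int)
    (h : counts.length = qa.length)
    (hbad : (counts.zip qa).any (fun p => p.2.2 < p.1) = true) :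
    goodC qa (addC qa counts c) = false := by
  rw [List.any_eq_true] at hbad
  obtain ⟨x, hx, hlt⟩ := hbad
  obtain ⟨i, hi, hget⟩ := List.mem_iff_getElem.mp hx
  have hiq : i < qa.length := by simp [h] at hi; omega
  have hic : i < counts.length := by omega
  rw [List.getElem_zip] at hget
  by_contra hgood
  rw [Bool.not_eq_false, goodC, List.all_eq_true] at hgood
  have hlen := length_addC qa counts c h
  have hmem : ((addC qa counts c)[i]'(by omega), qa[i]'hiq) ∈ (addC qa counts c).zip qa := by
    rw [← List.getElem_zip (h := by simp [hlen]; omega)]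
    exact List.getElem_mem _
  have := hgood _ hmem
  simp only [beq_iff_eq] at this
  have hle := le_addC qa counts c h i hiq
  have h1 : counts[i]'hic = x.1 := by rw [← hget]
  have h2 : qa[i]'hiq = x.2 := by rw [← hget]
  simp only [decide_eq_true_eq] at hlt
  rw [h2] at this
  omega

-- recB counts exactly the good extensions among the combinations of the remaining values
lemma recB_eq_countP (qa : List (PySem.Set Int × Int)) (vals : List Int) :
    ∀ (k : Nat) (counts : List Int), counts.length = qa.length →
    recB qa vals k counts
      = ((PySem.List.combinations vals k).countP (fun c => goodC qa (addC qa counts c)) : Int) := by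
  induction vals with
  | nil =>
    intro k counts h
    cases k with
    | zero => simp [recB, PySem.List.combinations_zero, addC, goodC, List.countP_cons]
    | succ k => simp [recB, PySem.List.combinations_nil_succ]
  | cons v rest ih =>
    intro k counts h
    cases k with
    | zero => simp [recB, PySem.List.combinations_zero, addC, goodC, List.countP_cons]
    | succ k =>
      rw [recB, PySem.List.combinations_cons_succ, List.countP_append, List.countP_map]
      have hcomp : ((fun c => goodC qa (addC qa counts c)) ∘ (v :: ·))
          = (fun c => goodC qa (addC qa (stepC qa counts v) c)) := rfl
      have hfold : (counts.zip qa).map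
            (fun p => p.1 + if PySem.Set.contains p.2.1 v then (1 : Int) else 0)
          = stepC qa counts v := rfl
      rw [hcomp, hfold]
      have hlen := length_stepC qa counts v h
      split
      · -- pruned branch: the whole sub-count is zero
        next hbad =>
        have : (PySem.List.combinations rest k).countP
            (fun c => goodC qa (addC qa (stepC qa counts v) c)) = 0 := by
          rw [List.countP_eq_zero]
          intro c _
          simp [goodC_false_of_bad qa (stepC qa counts v) c hlen hbad]
        rw [this, ih (k + 1) counts h]
        push_cast; ring
      · next hbad =>
        rw [ih k (stepC qa counts v) hlen, ih (k + 1) counts h]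
        push_cast; ring

-- componentwise decomposition of the counter update
lemma addC_nil_nil (c : List Int) : addC [] [] c = [] := by
  induction c with
  | nil => rfl
  | cons v c ih => simpa [addC, stepC] using ih

lemma addC_cons (p : PySem.Set Int × Int) (qa : List (PySem.Set Int × Int))
    (x : Int) (counts c : List Int) :
    addC (p :: qa) (x :: counts) c
      = (c.foldl (fun y v => if PySem.Set.contains p.1 v then y + 1 else y) x) :: addC qa counts c := by
  induction c generalizing x counts with
  | nil => rfl
  | cons v c ih =>
    have hstep : stepC (p :: qa) (x :: counts) v
        = (x + (if PySem.Set.contains p.1 v then (1 : Int) else 0)) :: stepC qa counts v := by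
      simp [stepC]
    rw [addC, List.foldl_cons, hstep, ← addC, ih, List.foldl_cons]
    congr 1
    split
    · rfl
    · norm_num

-- the counters at a leaf are exactly the per-query membership counts
lemma goodC_replicate (c : List Int) :
    ∀ (qa : List (PySem.Set Int × Int)),
    goodC qa (addC qa (List.replicate qa.length (0 : Int)) c)
      = qa.all (fun p => ((c.countP (fun v => PySem.Set.contains p.1 v) : Nat) : Int) == p.2) := by
  intro qa
  induction qa with
  | nil => simp [addC_nil_nil, goodC]
  | cons p qa ih =>
    simp only [List.length_cons, List.replicate_succ]
    rw [addC_cons, PySem.List.foldl_if_add_one]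
    simp only [goodC, List.zip_cons_cons, List.all_cons] at ih ⊢
    rw [ih]
    have hcnt : List.countP p.1.contains c = List.countP (fun v => decide (v ∈ p.1)) c :=
      List.countP_congr (fun v _ => by simp)
    rw [hcnt]
    norm_num

-- the intersection size A computes is the membership count, for duplicate-free candidates
lemma interLen_eq_countP (c t : List Int) (hc : c.Nodup) :
    PySem.Set.len (PySem.Set.inter (PySem.Set.ofList c) (PySem.Set.ofList t))
      = ((c.countP (fun v => PySem.Set.contains (PySem.Set.ofList t) v) : Nat) : Int) := by
  simp [PySem.Set.inter, PySem.Set.len, PySem.Set.ofList_eq_self_of_nodup c hc,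
    List.countP_eq_length_filter]

-- A's early-exit check equals an 'all' over the pairs
lemma chkA_eq_all (c : List Int) (pairs : List (List Int × Int)) :
    chkA c pairs = pairs.all
      (fun ta => (PySem.Set.len (PySem.Set.inter (PySem.Set.ofList c) (PySem.Set.ofList ta.1)) : Int) == ta.2) := by
  induction pairs with
  | nil => rfl
  | cons hd tl ih =>
    obtain ⟨t, a⟩ := hd
    simp only [chkA, List.all_cons, ih]
    simp [Bool.beq_eq_decide_eq]

-- ===== VERDICT (by name: the statement is the Claim_ definition above) =====
theorem solution_spec : Claim_equal_solution := by
  intro n q ans _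
  unfold Spec_solution solution solution_alt
  dsimp only
  rw [PySem.List.foldl_if_add_one,
      recB_eq_countP _ _ 5 _ (by simp)]
  have hpred : ∀ c ∈ PySem.List.combinations (PySem.List.pyRange 1 (n + 1) 1) 5,
      chkA c (q.zip ans)
        = goodC ((q.zip ans).map (fun p => (PySem.Set.ofList p.1, p.2)))
            (addC ((q.zip ans).map (fun p => (PySem.Set.ofList p.1, p.2)))
              (List.replicate ((q.zip ans).map (fun p => (PySem.Set.ofList p.1, p.2))).length 0) c) := by
    intro c hc
    have hcnd : c.Nodup :=
      (PySem.List.sublist_of_mem_combinations hc).nodup (PySem.List.nodup_pyRange_one 1 (n + 1))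
    rw [chkA_eq_all, goodC_replicate, List.all_map]
    congr 1
    funext ta
    simp only [Function.comp]
    rw [interLen_eq_countP _ _ hcnd]
  rw [List.countP_congr (fun c hc => by rw [hpred c hc])]
  omega
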